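-- pv_equiv track=rewrite | github.com/mitsuo0114/competitive_programming | python/atcoder/Grand028/A.py | solve
-- ===== SOURCE A (Python) =====
-- def solve(S):
--     if len(S) == 1:
--         return 0
--
--     j = 0
--     ans = 0
--     for i in range(0, len(S)):
--         if S[i] == "W":
--             ans += (i - j)
--             j += 1
--     return ans
-- ===== SOURCE B (Python) =====
-- def solve(S):
--     # The answer is the number of ordered pairs (p, q) with p < q,
--     # S[p] != 'W' and S[q] == 'W': each 'W' must hop over every
--     # non-'W' character to its left exactly once. Count these pairs
--     # by scanning S from the RIGHT, keeping how many 'W's have been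
--     # seen; every non-'W' character contributes that count.
--     ans = 0
--     w = 0
--     for c in reversed(S):
--         if c == "W":
--             w += 1
--         else:
--             ans += w
--     return ans
-- ===== Notes on version B (the rewrite author's own statement) =====
-- stated objective: alternative
-- what changed: Recasts the task as counting inversion pairs (non-'W' before 'W'): B scans S in reverse keeping only a count of W's seen and adds it for each non-W character, using no character indices, no moving pointer j and no position sums at all.
import Mathlib
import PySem

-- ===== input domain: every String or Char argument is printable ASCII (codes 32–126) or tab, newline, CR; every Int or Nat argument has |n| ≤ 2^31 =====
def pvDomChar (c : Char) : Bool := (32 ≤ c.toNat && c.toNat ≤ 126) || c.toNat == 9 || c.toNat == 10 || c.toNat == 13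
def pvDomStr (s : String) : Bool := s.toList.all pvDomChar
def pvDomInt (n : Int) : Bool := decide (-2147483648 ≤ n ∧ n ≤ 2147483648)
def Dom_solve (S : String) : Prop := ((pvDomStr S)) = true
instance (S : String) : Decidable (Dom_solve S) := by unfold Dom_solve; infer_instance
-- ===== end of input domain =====

-- B counts the (non-'W', 'W') inversion pairs by a reverse scan with a running count of
-- W's, instead of A's forward index/pointer arithmetic; objective: alternative.

-- ===== PORT A =====
-- the for-loop over range(len(S)) with state (j, ans); i is the running index
def solveLoop : List Char → Int → Int → Int → Int
  | [], _, _, ans => ans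
  | c :: cs, i, j, ans =>
      if c = 'W' then solveLoop cs (i + 1) (j + 1) (ans + (i - j))
      else solveLoop cs (i + 1) j ans

def solve (S : String) : Int :=
  if S.toList.length = 1 then 0
  else solveLoop S.toList 0 0 0

-- ===== PORT B =====
-- the for-loop over reversed(S) with state (ans, w)
def altLoop : List Char → Int → Int → Int
  | [], ans, _ => ans
  | c :: cs, ans, w =>
      if c = 'W' then altLoop cs ans (w + 1)
      else altLoop cs (ans + w) w

def solve_alt (S : String) : Int := altLoop S.toList.reverse 0 0

-- ===== PRECONDITION & SPEC =====
def Spec_solve (S : String) (out : Int) : Prop := out = solve_alt S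
instance (S : String) (out : Int) : Decidable (Spec_solve S out) := by unfold Spec_solve; infer_instance

-- ===== CLAIM (what is proved, stated in full; the proofs are below) =====
def Claim_equal_solve : Prop := ∀ (S : String), Dom_solve S → Spec_solve S (solve S)

-- ===== LEMMAS AND PROOFS =====

/-- number of 'W's -/
def wcnt (cs : List Char) : Nat := cs.count 'W'

/-- number of non-'W' characters, as an Int -/
def nwcnt : List Char → Int
  | [] => 0
  | c :: cs => (if c = 'W' then 0 else 1) + nwcnt cs

/-- sum of absolute indices of the 'W's, first element at index i -/
def wsum : List Char → Int → Int
  | [], _ => 0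
  | c :: cs, i => (if c = 'W' then i else 0) + wsum cs (i + 1)

/-- triangular number 0 + 1 + ... + (n-1) -/
def tri : Nat → Int
  | 0 => 0
  | n + 1 => tri n + n

/-- pairs (non-'W' strictly BEFORE 'W') in the list -/
def invL : List Char → Int
  | [] => 0
  | c :: cs => (if c = 'W' then 0 else (wcnt cs : Int)) + invL cs

/-- pairs ('W' strictly BEFORE non-'W') in the list -/
def invR : List Char → Int
  | [] => 0
  | c :: cs => (if c = 'W' then nwcnt cs else 0) + invR cs

theorem solveLoop_eq (cs : List Char) : ∀ (i j ans : Int),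
    solveLoop cs i j ans = ans + wsum cs i - (j * wcnt cs + tri (wcnt cs)) := by
  induction cs with
  | nil => intro i j ans; simp [solveLoop, wsum, wcnt, tri]
  | cons c cs ih =>
    intro i j ans
    by_cases h : c = 'W'
    · simp only [solveLoop, wsum, wcnt, h, List.count_cons_self, ih]
      simp [tri]; ring
    · simp only [solveLoop, wsum, wcnt, if_neg h, ih]
      rw [List.count_cons_of_ne (by simpa using h)]
      ring_nf

theorem altLoop_eq (cs : List Char) : ∀ (ans w : Int),
    altLoop cs ans w = ans + w * nwcnt cs + invR cs := by
  induction cs with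
  | nil => intro ans w; simp [altLoop, nwcnt, invR]
  | cons c cs ih =>
    intro ans w
    by_cases h : c = 'W' <;> simp only [altLoop, nwcnt, invR, h, if_true, ih] <;>
      simp [h] <;> ring

theorem nwcnt_append_singleton (xs : List Char) (c : Char) :
    nwcnt (xs ++ [c]) = nwcnt xs + (if c = 'W' then 0 else 1) := by
  induction xs with
  | nil => simp [nwcnt]
  | cons x xs ih => simp only [List.cons_append, nwcnt, ih]; ring

theorem invR_append_singleton (xs : List Char) (c : Char) :
    invR (xs ++ [c]) = invR xs + (if c = 'W' then 0 else (wcnt xs : Int)) := by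
  induction xs with
  | nil => simp [invR, wcnt, nwcnt]
  | cons x xs ih =>
    simp only [List.cons_append, invR, ih, nwcnt_append_singleton]
    by_cases hx : x = 'W' <;> by_cases hc : c = 'W' <;>
      simp [hx, hc, wcnt]; ring

theorem invR_reverse (cs : List Char) : invR cs.reverse = invL cs := by
  induction cs with
  | nil => simp [invR, invL]
  | cons c cs ih =>
    rw [List.reverse_cons, invR_append_singleton, ih]
    simp only [invL, wcnt, List.count_reverse]
    ring

theorem wsum_eq (cs : List Char) : ∀ (i : Int),
    wsum cs i = i * wcnt cs + invL cs + tri (wcnt cs) := by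
  induction cs with
  | nil => intro i; simp [wsum, wcnt, invL, tri]
  | cons c cs ih =>
    intro i
    by_cases h : c = 'W'
    · simp only [wsum, invL, wcnt, h, List.count_cons_self, if_pos, ih, tri]
      push_cast; ring
    · simp only [wsum, invL, wcnt, if_neg h, ih]
      rw [List.count_cons_of_ne (by simpa using h)]
      ring

theorem solve_alt_eq (S : String) : solve_alt S = invL S.toList := by
  unfold solve_alt
  rw [altLoop_eq, invR_reverse]; ring

theorem singleton_invL (cs : List Char) (h : cs.length = 1) : invL cs = 0 := by
  match cs, h with
  | [c], _ => by_cases hc : c = 'W' <;> simp [invL, wcnt, hc]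

-- ===== VERDICT (by name: the statement is the Claim_ definition above) =====
theorem solve_spec : Claim_equal_solve := by
  intro S _
  unfold Spec_solve solve
  rw [solve_alt_eq]
  split_ifs with h
  · exact (singleton_invL _ h).symm
  · rw [solveLoop_eq, wsum_eq]; ring
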